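-- pv_equiv track=rewrite | github.com/BTCElectrician/ohmni-oracle-v3 | services/extraction/electrical.py | _prioritize_electrical_tables
-- ===== SOURCE A (Python) =====
-- from typing import List, Dict, Any, Optional
--
-- def _prioritize_electrical_tables(
--     tables: List[Dict[str, Any]]
-- ) -> List[Dict[str, Any]]:
--     """Prioritize electrical tables - panel schedules first."""
--     # Move panel schedules to the top
--     panel_tables = []
--     other_tables = []
--
--     for table in tables:
--         content = table.get("content", "").lower()
--         is_panel_schedule = (
--             ("panel" in content and "circuit" in content)
--             or ("ckt" in content and "trip" in content)
--             or ("breaker" in content and "poles" in content)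
--         )
--
--         if is_panel_schedule:
--             # Add a hint for the AI processor
--             if "content" in table:
--                 table["content"] = "PANEL SCHEDULE TABLE:\n" + table["content"]
--             panel_tables.append(table)
--         else:
--             other_tables.append(table)
--
--     return panel_tables + other_tables
-- ===== SOURCE B (Python) =====
-- from typing import List, Dict, Any
--
-- _PANEL_HINTS = (("panel", "circuit"), ("ckt", "trip"), ("breaker", "poles"))
--
--
-- def _prioritize_electrical_tables(
--     tables: List[Dict[str, Any]]
-- ) -> List[Dict[str, Any]]:
--     """Prioritize electrical tables - panel schedules first.
--
--     One decorate pass (keyword-table detection + in-place content hint, same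
--     side effect as the original), then a stable sort on a 0/1 priority keeps
--     each group's original order.
--     """
--     decorated = []
--     for table in tables:
--         content = table.get("content", "").lower()
--         is_panel_schedule = any(
--             k1 in content and k2 in content for k1, k2 in _PANEL_HINTS
--         )
--         if is_panel_schedule and "content" in table:
--             table["content"] = "PANEL SCHEDULE TABLE:\n" + table["content"]
--         decorated.append((0 if is_panel_schedule else 1, table))
--     decorated.sort(key=lambda pair: pair[0])
--     return [table for _, table in decorated]
-- ===== Notes on version B (the rewrite author's own statement) =====
-- stated objective: alternative
-- what changed: Replaces the partition-into-two-lists-and-concatenate strategy with a single decorate pass (0/1 priority, content mutated during detection) followed by a stable sort on the priority.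
import Mathlib
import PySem

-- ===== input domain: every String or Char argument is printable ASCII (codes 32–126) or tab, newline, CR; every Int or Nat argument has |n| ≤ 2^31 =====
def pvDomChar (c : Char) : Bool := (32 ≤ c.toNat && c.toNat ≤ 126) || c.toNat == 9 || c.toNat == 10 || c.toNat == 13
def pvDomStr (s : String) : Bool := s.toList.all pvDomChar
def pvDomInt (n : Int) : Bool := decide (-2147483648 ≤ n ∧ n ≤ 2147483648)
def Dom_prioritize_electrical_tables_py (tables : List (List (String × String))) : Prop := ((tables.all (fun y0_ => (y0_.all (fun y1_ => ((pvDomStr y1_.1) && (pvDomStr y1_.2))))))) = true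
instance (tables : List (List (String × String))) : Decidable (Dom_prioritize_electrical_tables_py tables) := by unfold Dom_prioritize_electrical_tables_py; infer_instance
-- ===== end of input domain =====

-- B replaces A's partition-into-two-lists-and-concatenate with one decorate pass plus a
-- stable sort on a 0/1 priority (alternative decomposition, not faster). Both Pythons
-- mutate the input dicts' "content" in place identically; the equivalence proved here is
-- about the return value.

-- ===== PORT A =====
def prioritize_electrical_tables_py (tables : List (List (String × String))) : List (List (String × String)) :=
  let r := tables.foldl (fun acc table =>
      let d := PySem.Dict.ofList table
      let content := PySem.Str.lower (d.getD "content" "")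
      let is_panel_schedule :=
        (PySem.Str.isIn "panel" content && PySem.Str.isIn "circuit" content)
        || (PySem.Str.isIn "ckt" content && PySem.Str.isIn "trip" content)
        || (PySem.Str.isIn "breaker" content && PySem.Str.isIn "poles" content)
      if is_panel_schedule then
        let d2 := if d.contains "content"
          then d.insert "content" ("PANEL SCHEDULE TABLE:\n" ++ d.getD "content" "")
          else d
        (acc.1 ++ [d2.items], acc.2)
      else
        (acc.1, acc.2 ++ [d.items]))
    ([], [])
  r.1 ++ r.2

-- ===== PORT B =====
def prioritize_electrical_tables_py_alt (tables : List (List (String × String))) : List (List (String × String)) :=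
  let decorated := tables.foldl (fun acc table =>
      let d := PySem.Dict.ofList table
      let content := PySem.Str.lower (d.getD "content" "")
      let is_panel_schedule := [("panel", "circuit"), ("ckt", "trip"), ("breaker", "poles")].any
        (fun kw => PySem.Str.isIn kw.1 content && PySem.Str.isIn kw.2 content)
      let d2 := if is_panel_schedule && d.contains "content"
        then d.insert "content" ("PANEL SCHEDULE TABLE:\n" ++ d.getD "content" "")
        else d
      acc ++ [((if is_panel_schedule then (0 : Int) else 1), d2.items)])
    []
  (PySem.List.sorted decorated (fun pair => pair.1) false).map (fun pair => pair.2)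

-- ===== PRECONDITION & SPEC =====
def Spec_prioritize_electrical_tables_py (tables : List (List (String × String))) (out : List (List (String × String))) : Prop := out = prioritize_electrical_tables_py_alt tables
instance (tables : List (List (String × String))) (out : List (List (String × String))) : Decidable (Spec_prioritize_electrical_tables_py tables out) := by unfold Spec_prioritize_electrical_tables_py; infer_instance

-- ===== CLAIM (what is proved, stated in full; the proofs are below) =====
def Claim_equal_prioritize_electrical_tables_py : Prop := ∀ (tables : List (List (String × String))), Dom_prioritize_electrical_tables_py tables → Spec_prioritize_electrical_tables_py tables (prioritize_electrical_tables_py tables)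

-- ===== LEMMAS AND PROOFS =====

-- the panel-schedule test both Pythons perform
def pvPanelB (table : List (String × String)) : Bool :=
  let content := PySem.Str.lower ((PySem.Dict.ofList table).getD "content" "")
  (PySem.Str.isIn "panel" content && PySem.Str.isIn "circuit" content)
  || (PySem.Str.isIn "ckt" content && PySem.Str.isIn "trip" content)
  || (PySem.Str.isIn "breaker" content && PySem.Str.isIn "poles" content)

-- the (possibly mutated) dict a table ends up as, in output form
def pvOutT (table : List (String × String)) : List (String × String) :=
  let d := PySem.Dict.ofList table
  (if pvPanelB table && d.contains "content"
    then d.insert "content" ("PANEL SCHEDULE TABLE:\n" ++ d.getD "content" "")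
    else d).items

-- abstract forms of the two loop bodies
def pvStepA (acc : List (List (String × String)) × List (List (String × String)))
    (table : List (String × String)) :
    List (List (String × String)) × List (List (String × String)) :=
  if pvPanelB table then (acc.1 ++ [pvOutT table], acc.2) else (acc.1, acc.2 ++ [pvOutT table])

def pvDec (table : List (String × String)) : Int × List (String × String) :=
  ((if pvPanelB table then (0 : Int) else 1), pvOutT table)

lemma pvStepA_eq :
    (fun (acc : List (List (String × String)) × List (List (String × String)))
         (table : List (String × String)) =>
      let d := PySem.Dict.ofList table
      let content := PySem.Str.lower (d.getD "content" "")
      let is_panel_schedule :=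
        (PySem.Str.isIn "panel" content && PySem.Str.isIn "circuit" content)
        || (PySem.Str.isIn "ckt" content && PySem.Str.isIn "trip" content)
        || (PySem.Str.isIn "breaker" content && PySem.Str.isIn "poles" content)
      if is_panel_schedule then
        let d2 := if d.contains "content"
          then d.insert "content" ("PANEL SCHEDULE TABLE:\n" ++ d.getD "content" "")
          else d
        (acc.1 ++ [d2.items], acc.2)
      else
        (acc.1, acc.2 ++ [d.items])) = pvStepA := by
  funext acc table
  simp only [pvStepA, pvOutT, pvPanelB]
  by_cases h : ((PySem.Str.isIn "panel" (PySem.Str.lower ((PySem.Dict.ofList table).getD "content" "")) &&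
        PySem.Str.isIn "circuit" (PySem.Str.lower ((PySem.Dict.ofList table).getD "content" "")))
      || (PySem.Str.isIn "ckt" (PySem.Str.lower ((PySem.Dict.ofList table).getD "content" "")) &&
        PySem.Str.isIn "trip" (PySem.Str.lower ((PySem.Dict.ofList table).getD "content" "")))
      || (PySem.Str.isIn "breaker" (PySem.Str.lower ((PySem.Dict.ofList table).getD "content" "")) &&
        PySem.Str.isIn "poles" (PySem.Str.lower ((PySem.Dict.ofList table).getD "content" "")))) = true
  · rw [if_pos h, if_pos h]
    simp only [h, Bool.true_and]
  · rw [if_neg h, if_neg h]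
    rw [Bool.not_eq_true] at h
    simp only [h, Bool.false_and]
    simp

lemma pvStepB_eq :
    (fun (acc : List (Int × List (String × String)))
         (table : List (String × String)) =>
      let d := PySem.Dict.ofList table
      let content := PySem.Str.lower (d.getD "content" "")
      let is_panel_schedule := [("panel", "circuit"), ("ckt", "trip"), ("breaker", "poles")].any
        (fun kw => PySem.Str.isIn kw.1 content && PySem.Str.isIn kw.2 content)
      let d2 := if is_panel_schedule && d.contains "content"
        then d.insert "content" ("PANEL SCHEDULE TABLE:\n" ++ d.getD "content" "")
        else d
      acc ++ [((if is_panel_schedule then (0 : Int) else 1), d2.items)])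
    = (fun acc table => acc ++ [pvDec table]) := by
  funext acc table
  simp only [pvDec, pvOutT, pvPanelB, List.any_cons, List.any_nil, Bool.or_false, Bool.or_assoc]

lemma pvA_fold (tables : List (List (String × String)))
    (a b : List (List (String × String))) :
    tables.foldl pvStepA (a, b)
    = (a ++ (tables.filter pvPanelB).map pvOutT,
       b ++ (tables.filter (fun t => !pvPanelB t)).map pvOutT) := by
  induction tables generalizing a b with
  | nil => simp
  | cons t ts ih =>
    by_cases h : pvPanelB t = true
    · simp [List.foldl_cons, pvStepA, h, ih]
    · simp [List.foldl_cons, pvStepA, h, ih]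

lemma pv_insertBy_append_not {α : Type} (before : α → α → Bool) (x : α)
    (A B : List α) (h : ∀ y ∈ A, before x y = false) :
    PySem.List.insertBy before x (A ++ B) = A ++ PySem.List.insertBy before x B := by
  induction A with
  | nil => simp
  | cons a A ih =>
    have ha : before x a = false := h a (by simp)
    simp [PySem.List.insertBy, ha, ih (fun y hy => h y (by simp [hy]))]

-- sorted by a 0/1 key is "the 0s then the 1s", each in original order
lemma pv_sorted_binary {α : Type} (xs : List (Int × α))
    (h : ∀ p ∈ xs, p.1 = 0 ∨ p.1 = 1) :
    PySem.List.sorted xs (fun p => p.1) false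
      = xs.filter (fun p => p.1 == 0) ++ xs.filter (fun p => p.1 == 1) := by
  rw [PySem.List.sorted_eq_foldl_insertBy]
  induction xs using List.reverseRecOn with
  | nil => simp
  | append_singleton xs x ih =>
    have hxs : ∀ p ∈ xs, p.1 = 0 ∨ p.1 = 1 := fun p hp => h p (by simp [hp])
    rw [List.foldl_append, List.foldl_cons, List.foldl_nil, ih hxs]
    have hmemkey : ∀ y ∈ xs.filter (fun p => p.1 == (0:Int)) ++ xs.filter (fun p => p.1 == (1:Int)),
        y.1 = 0 ∨ y.1 = 1 := by
      intro y hy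
      rcases List.mem_append.mp hy with hy | hy <;> exact hxs y (List.mem_filter.mp hy).1
    rcases h x (by simp) with hx | hx
    · -- key 0: skips the 0-block, lands in front of the 1-block
      rw [pv_insertBy_append_not _ x _ _ (by
        intro y hy
        have : y.1 = 0 := by simpa using (List.mem_filter.mp hy).2
        simp [hx, this])]
      have hfront : PySem.List.insertBy (fun a b => decide (a.1 < b.1)) x
          (xs.filter (fun p => p.1 == (1:Int))) = x :: xs.filter (fun p => p.1 == (1:Int)) := by
        cases hcase : xs.filter (fun p => p.1 == (1:Int)) with
        | nil => simp [PySem.List.insertBy]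
        | cons y ys =>
          have hy1 : y.1 = 1 := by
            have : y ∈ xs.filter (fun p => p.1 == (1:Int)) := by simp [hcase]
            simpa using (List.mem_filter.mp this).2
          simp [PySem.List.insertBy, hy1, hx]
      rw [hfront]
      simp [List.filter_append, hx]
    · -- key 1: goes to the very end
      rw [PySem.List.insertBy_of_forall_not_before _ x _ (by
        intro y hy
        rcases hmemkey y hy with h0 | h0 <;> simp [hx, h0])]
      simp [List.filter_append, hx]

lemma pv_filter0 (tables : List (List (String × String))) :
    tables.filter ((fun p : Int × List (String × String) => p.1 == 0) ∘ pvDec)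
      = tables.filter pvPanelB :=
  List.filter_congr (fun t _ => by
    by_cases h : pvPanelB t = true <;> simp [pvDec, h])

lemma pv_filter1 (tables : List (List (String × String))) :
    tables.filter ((fun p : Int × List (String × String) => p.1 == 1) ∘ pvDec)
      = tables.filter (fun t => !pvPanelB t) :=
  List.filter_congr (fun t _ => by
    by_cases h : pvPanelB t = true <;> simp [pvDec, h])

-- ===== VERDICT (by name: the statement is the Claim_ definition above) =====
set_option maxHeartbeats 2000000 in
theorem prioritize_electrical_tables_py_spec : Claim_equal_prioritize_electrical_tables_py := by
  intro tables _
  unfold Spec_prioritize_electrical_tables_py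
  unfold prioritize_electrical_tables_py prioritize_electrical_tables_py_alt
  dsimp only
  rw [pvStepA_eq, pvStepB_eq, pvA_fold,
      PySem.List.foldl_append_singleton_eq_map pvDec tables []]
  simp only [List.nil_append]
  rw [pv_sorted_binary (tables.map pvDec) (by
    intro p hp
    rcases List.mem_map.mp hp with ⟨t, _, rfl⟩
    by_cases h : pvPanelB t = true <;> simp [pvDec, h])]
  rw [List.filter_map, List.filter_map, pv_filter0, pv_filter1]
  simp [List.map_append, List.map_map, Function.comp_def, pvDec]
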